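-- pv_equiv track=rewrite | github.com/bcyphers/aoc-22 | 17/simple.py | bitstring
-- ===== SOURCE A (Python) =====
-- ROCKS = [
--     [[1,1,1,1]],
--     [[0,1,0],
--      [1,1,1],
--      [0,1,0]],
--     [[1,1,1],
--      [0,0,1],
--      [0,0,1]],
--     [[1],
--      [1],
--      [1],
--      [1]],
--     [[1,1],
--      [1,1]]
-- ]
--
-- WIDTH = [max(len(s) for s in r) for r in ROCKS]
--
-- HEIGHT = [len(r) for r in ROCKS]
--
-- MAX_X = 7
--
-- def bitstring(x, y, rock, y_rng):
--     out = ''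
--     for i in y_rng:
--         if i < y or i >= y + HEIGHT[rock]:
--             out += '0' * MAX_X
--             continue
--         for j in range(MAX_X):
--             if j >= x and j < x + WIDTH[rock]:
--                 out += str(ROCKS[rock][i - y][j - x])
--             else:
--                 out += '0'
--
--     return int(out, 2)
-- ===== SOURCE B (Python) =====
-- ROCKS = [
--     [[1,1,1,1]],
--     [[0,1,0],
--      [1,1,1],
--      [0,1,0]],
--     [[1,1,1],
--      [0,0,1],
--      [0,0,1]],
--     [[1],
--      [1],
--      [1],
--      [1]],
--     [[1,1],
--      [1,1]]
-- ]
--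
-- HEIGHT = [len(r) for r in ROCKS]
--
-- MAX_X = 7
--
-- def bitstring(x, y, rock, y_rng):
--     # accumulate the bitmask as an integer, one 7-bit row at a time,
--     # placing each rock cell at its column instead of scanning all 7 columns
--     result = 0
--     for i in y_rng:
--         row_val = 0
--         if y <= i < y + HEIGHT[rock]:
--             for j, bit in enumerate(ROCKS[rock][i - y]):
--                 c = x + j
--                 if 0 <= c < MAX_X:
--                     row_val += bit * 2 ** (MAX_X - 1 - c)
--         result = result * 2 ** MAX_X + row_val
--     return result
-- ===== Notes on version B (the rewrite author's own statement) =====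
-- stated objective: alternative
-- what changed: B accumulates the bitmask as an integer (shift row in, place each rock cell at its column x+j) instead of building a 7-chars-per-row binary string over all 7 columns and parsing it with int(out,2).
-- crash fix: On empty y_rng A raises ValueError from int('', 2) for any rock (the loop never runs); B returns 0, the empty bitmask. — e.g. on bitstring(0, 0, 0, []): A raises ValueError, B returns 0
import Mathlib
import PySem

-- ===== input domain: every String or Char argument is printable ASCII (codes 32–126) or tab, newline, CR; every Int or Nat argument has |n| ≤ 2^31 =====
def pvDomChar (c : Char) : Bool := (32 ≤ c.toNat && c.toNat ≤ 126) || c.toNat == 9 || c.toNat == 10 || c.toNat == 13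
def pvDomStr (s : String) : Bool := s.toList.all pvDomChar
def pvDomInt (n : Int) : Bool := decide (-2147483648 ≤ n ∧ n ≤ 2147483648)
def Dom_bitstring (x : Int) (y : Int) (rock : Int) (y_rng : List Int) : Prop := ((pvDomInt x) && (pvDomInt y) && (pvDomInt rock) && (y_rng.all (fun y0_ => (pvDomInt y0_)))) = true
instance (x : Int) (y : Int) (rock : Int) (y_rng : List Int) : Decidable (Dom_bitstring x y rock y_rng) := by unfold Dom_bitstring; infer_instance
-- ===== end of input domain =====

-- B accumulates the result as an integer (placing each rock cell at its column)
-- instead of building a 7-chars-per-row binary string and parsing it; alternative decomposition, same cost.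

-- ===== PORT A =====
def pvRocks : List (List (List Int)) :=
  [[[1,1,1,1]],
   [[0,1,0],[1,1,1],[0,1,0]],
   [[1,1,1],[0,0,1],[0,0,1]],
   [[1],[1],[1],[1]],
   [[1,1],[1,1]]]

-- WIDTH = [max(len(s) for s in r) for r in ROCKS]
def pvWidth : List Int := pvRocks.map (fun r => ((r.map (fun s => (s.length : Int))).max?).getD 0)

-- HEIGHT = [len(r) for r in ROCKS]
def pvHeight : List Int := pvRocks.map (fun r => (r.length : Int))

-- int(out, 2): out consists only of '0'/'1' here, so this parse is exact;
-- Python raises ValueError on the empty string (empty y_rng), excluded by Pre_.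
def pvStep (a : Int) (c : Char) : Int := 2 * a + (if c = '1' then 1 else 0)
def pvParse (l : List Char) : Int := l.foldl pvStep 0

def bitstring (x : Int) (y : Int) (rock : Int) (y_rng : List Int) : Int :=
  -- pyGetD is exact here: Pre_ puts rock in range, and the guards keep the row/column indices in range
  let out : List Char := y_rng.foldl (fun out i =>
    if i < y ∨ i ≥ y + PySem.List.pyGetD pvHeight rock 0 then
      out ++ List.replicate 7 '0'
    else
      (PySem.List.pyRange 0 7 1).foldl (fun out j =>
        if j ≥ x ∧ j < x + PySem.List.pyGetD pvWidth rock 0 then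
          out ++ (PySem.Int.toStr (PySem.List.pyGetD
            (PySem.List.pyGetD (PySem.List.pyGetD pvRocks rock []) (i - y) []) (j - x) 0)).toList
        else
          out ++ ['0']) out) []
  pvParse out

-- ===== PORT B =====
def bitstring_alt (x : Int) (y : Int) (rock : Int) (y_rng : List Int) : Int :=
  y_rng.foldl (fun result i =>
    let row_val : Int :=
      if y ≤ i ∧ i < y + PySem.List.pyGetD pvHeight rock 0 then
        (PySem.List.enumerate (PySem.List.pyGetD (PySem.List.pyGetD pvRocks rock []) (i - y) [])).foldl
          (fun rv jb =>
            let c := x + jb.1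
            -- 2 ** (MAX_X - 1 - c): the guard gives 0 ≤ c < 7, so .toNat is exact
            if 0 ≤ c ∧ c < 7 then rv + jb.2 * 2 ^ (7 - 1 - c).toNat else rv) 0
      else 0
    result * 2 ^ 7 + row_val) 0

-- ===== PRECONDITION & SPEC =====
-- Pre_ excludes exactly the inputs where Python A raises: empty y_rng (int('',2) is a
-- ValueError), and rock outside [-5,5) unless every i < y short-circuits the HEIGHT[rock]
-- lookup (otherwise an IndexError).
def Pre_bitstring (x : Int) (y : Int) (rock : Int) (y_rng : List Int) : Prop :=
  y_rng ≠ [] ∧ ((-5 ≤ rock ∧ rock < 5) ∨ ∀ i ∈ y_rng, i < y)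
instance (x : Int) (y : Int) (rock : Int) (y_rng : List Int) : Decidable (Pre_bitstring x y rock y_rng) := by
  unfold Pre_bitstring; infer_instance

def pvWitness_bitstring : Int × Int × Int × List Int := (0, 0, 0, [0])

-- On empty y_rng A raises ValueError via int('', 2) (the loop never runs, for any rock); B returns 0, the mask with no rows.
def Raises_bitstring (x : Int) (y : Int) (rock : Int) (y_rng : List Int) : Prop :=
  y_rng = []
instance (x : Int) (y : Int) (rock : Int) (y_rng : List Int) : Decidable (Raises_bitstring x y rock y_rng) := by
  unfold Raises_bitstring; infer_instance
def pvRaiseWitness_bitstring : Int × Int × Int × List Int := (0, 0, 0, [])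
def pvRaiseWitnessOut_bitstring : Int := 0

def Spec_bitstring (x : Int) (y : Int) (rock : Int) (y_rng : List Int) (out : Int) : Prop := out = bitstring_alt x y rock y_rng
instance (x : Int) (y : Int) (rock : Int) (y_rng : List Int) (out : Int) : Decidable (Spec_bitstring x y rock y_rng out) := by unfold Spec_bitstring; infer_instance

-- ===== CLAIM (what is proved, stated in full; the proofs are below) =====
def Claim_equal_bitstring : Prop := ∀ (x : Int) (y : Int) (rock : Int) (y_rng : List Int), Dom_bitstring x y rock y_rng → Pre_bitstring x y rock y_rng → Spec_bitstring x y rock y_rng (bitstring x y rock y_rng)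

def Claim_raises_bitstring : Prop := (∀ (x : Int) (y : Int) (rock : Int) (y_rng : List Int), Dom_bitstring x y rock y_rng → Raises_bitstring x y rock y_rng → ¬ Pre_bitstring x y rock y_rng) ∧ (Dom_bitstring (pvRaiseWitness_bitstring.1) (pvRaiseWitness_bitstring.2.1) (pvRaiseWitness_bitstring.2.2.1) (pvRaiseWitness_bitstring.2.2.2) ∧ Raises_bitstring (pvRaiseWitness_bitstring.1) (pvRaiseWitness_bitstring.2.1) (pvRaiseWitness_bitstring.2.2.1) (pvRaiseWitness_bitstring.2.2.2) ∧ bitstring_alt (pvRaiseWitness_bitstring.1) (pvRaiseWitness_bitstring.2.1) (pvRaiseWitness_bitstring.2.2.1) (pvRaiseWitness_bitstring.2.2.2) = pvRaiseWitnessOut_bitstring)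

-- ===== LEMMAS AND PROOFS =====

theorem pvParse_scale (l : List Char) (a : Int) :
    l.foldl pvStep a = a * 2 ^ l.length + l.foldl pvStep 0 := by
  induction l generalizing a with
  | nil => simp
  | cons c l ih =>
    simp only [List.foldl_cons, List.length_cons]
    rw [ih (pvStep a c), ih (pvStep 0 c)]
    simp only [pvStep, pow_succ]
    ring

theorem pv_flatMap_congr {α β : Type} {l : List α} {f g : α → List β}
    (h : ∀ a ∈ l, f a = g a) : l.flatMap f = l.flatMap g := by
  induction l with
  | nil => rfl
  | cons a l ih =>
    simp only [List.flatMap_cons, h a (List.mem_cons_self),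
      ih (fun b hb => h b (List.mem_cons_of_mem a hb))]

theorem pv_foldl_fix {α β : Type} (l : List β) (f : α → β → α) (a : α)
    (h : ∀ x b, b ∈ l → f x b = x) : l.foldl f a = a := by
  induction l generalizing a with
  | nil => rfl
  | cons b l ih =>
    rw [List.foldl_cons, h a b (List.mem_cons_self)]
    exact ih _ (fun x c hc => h x c (List.mem_cons_of_mem b hc))

theorem pv_row_1 (x : Int) :
    ((PySem.List.pyRange 0 7 1).flatMap (fun j =>
        if j ≥ x ∧ j < x + (4:Int) then
          (PySem.Int.toStr (PySem.List.pyGetD ([1,1,1,1] : List Int) (j - x) 0)).toList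
        else ['0'])).length = 7 ∧
    ((PySem.List.pyRange 0 7 1).flatMap (fun j =>
        if j ≥ x ∧ j < x + (4:Int) then
          (PySem.Int.toStr (PySem.List.pyGetD ([1,1,1,1] : List Int) (j - x) 0)).toList
        else ['0'])).foldl pvStep 0
      = (PySem.List.enumerate ([1,1,1,1] : List Int)).foldl
          (fun rv jb =>
            let c := x + jb.1
            if 0 ≤ c ∧ c < 7 then rv + jb.2 * 2 ^ (7 - 1 - c).toNat else rv) 0 := by
  rcases (by omega : 7 ≤ x ∨ x + 7 ≤ 0 ∨ (-6 ≤ x ∧ x ≤ 6)) with hx | hx | hx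
  · rw [pv_flatMap_congr (g := fun _ => ['0'])
      (by intro j hj; rw [PySem.List.mem_pyRange_one] at hj; rw [if_neg (by omega)])]
    refine ⟨by decide, ?_⟩
    rw [show PySem.List.enumerate ([1,1,1,1] : List Int) = [((0:Int),(1:Int)),((1:Int),(1:Int)),((2:Int),(1:Int)),((3:Int),(1:Int))] from by decide]
    symm
    apply pv_foldl_fix
    intro rv jb hjb
    fin_cases hjb <;> simp only <;> rw [if_neg (by omega)]
  · rw [pv_flatMap_congr (g := fun _ => ['0'])
      (by intro j hj; rw [PySem.List.mem_pyRange_one] at hj; rw [if_neg (by omega)])]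
    refine ⟨by decide, ?_⟩
    rw [show PySem.List.enumerate ([1,1,1,1] : List Int) = [((0:Int),(1:Int)),((1:Int),(1:Int)),((2:Int),(1:Int)),((3:Int),(1:Int))] from by decide]
    symm
    apply pv_foldl_fix
    intro rv jb hjb
    fin_cases hjb <;> simp only <;> rw [if_neg (by omega)]
  · obtain ⟨h1, h2⟩ := hx
    interval_cases x <;> exact ⟨by decide, by decide⟩

theorem pv_row_2 (x : Int) :
    ((PySem.List.pyRange 0 7 1).flatMap (fun j =>
        if j ≥ x ∧ j < x + (3:Int) then
          (PySem.Int.toStr (PySem.List.pyGetD ([0,1,0] : List Int) (j - x) 0)).toList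
        else ['0'])).length = 7 ∧
    ((PySem.List.pyRange 0 7 1).flatMap (fun j =>
        if j ≥ x ∧ j < x + (3:Int) then
          (PySem.Int.toStr (PySem.List.pyGetD ([0,1,0] : List Int) (j - x) 0)).toList
        else ['0'])).foldl pvStep 0
      = (PySem.List.enumerate ([0,1,0] : List Int)).foldl
          (fun rv jb =>
            let c := x + jb.1
            if 0 ≤ c ∧ c < 7 then rv + jb.2 * 2 ^ (7 - 1 - c).toNat else rv) 0 := by
  rcases (by omega : 7 ≤ x ∨ x + 7 ≤ 0 ∨ (-6 ≤ x ∧ x ≤ 6)) with hx | hx | hx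
  · rw [pv_flatMap_congr (g := fun _ => ['0'])
      (by intro j hj; rw [PySem.List.mem_pyRange_one] at hj; rw [if_neg (by omega)])]
    refine ⟨by decide, ?_⟩
    rw [show PySem.List.enumerate ([0,1,0] : List Int) = [((0:Int),(0:Int)),((1:Int),(1:Int)),((2:Int),(0:Int))] from by decide]
    symm
    apply pv_foldl_fix
    intro rv jb hjb
    fin_cases hjb <;> simp only <;> rw [if_neg (by omega)]
  · rw [pv_flatMap_congr (g := fun _ => ['0'])
      (by intro j hj; rw [PySem.List.mem_pyRange_one] at hj; rw [if_neg (by omega)])]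
    refine ⟨by decide, ?_⟩
    rw [show PySem.List.enumerate ([0,1,0] : List Int) = [((0:Int),(0:Int)),((1:Int),(1:Int)),((2:Int),(0:Int))] from by decide]
    symm
    apply pv_foldl_fix
    intro rv jb hjb
    fin_cases hjb <;> simp only <;> rw [if_neg (by omega)]
  · obtain ⟨h1, h2⟩ := hx
    interval_cases x <;> exact ⟨by decide, by decide⟩

theorem pv_row_3 (x : Int) :
    ((PySem.List.pyRange 0 7 1).flatMap (fun j =>
        if j ≥ x ∧ j < x + (3:Int) then
          (PySem.Int.toStr (PySem.List.pyGetD ([1,1,1] : List Int) (j - x) 0)).toList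
        else ['0'])).length = 7 ∧
    ((PySem.List.pyRange 0 7 1).flatMap (fun j =>
        if j ≥ x ∧ j < x + (3:Int) then
          (PySem.Int.toStr (PySem.List.pyGetD ([1,1,1] : List Int) (j - x) 0)).toList
        else ['0'])).foldl pvStep 0
      = (PySem.List.enumerate ([1,1,1] : List Int)).foldl
          (fun rv jb =>
            let c := x + jb.1
            if 0 ≤ c ∧ c < 7 then rv + jb.2 * 2 ^ (7 - 1 - c).toNat else rv) 0 := by
  rcases (by omega : 7 ≤ x ∨ x + 7 ≤ 0 ∨ (-6 ≤ x ∧ x ≤ 6)) with hx | hx | hx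
  · rw [pv_flatMap_congr (g := fun _ => ['0'])
      (by intro j hj; rw [PySem.List.mem_pyRange_one] at hj; rw [if_neg (by omega)])]
    refine ⟨by decide, ?_⟩
    rw [show PySem.List.enumerate ([1,1,1] : List Int) = [((0:Int),(1:Int)),((1:Int),(1:Int)),((2:Int),(1:Int))] from by decide]
    symm
    apply pv_foldl_fix
    intro rv jb hjb
    fin_cases hjb <;> simp only <;> rw [if_neg (by omega)]
  · rw [pv_flatMap_congr (g := fun _ => ['0'])
      (by intro j hj; rw [PySem.List.mem_pyRange_one] at hj; rw [if_neg (by omega)])]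
    refine ⟨by decide, ?_⟩
    rw [show PySem.List.enumerate ([1,1,1] : List Int) = [((0:Int),(1:Int)),((1:Int),(1:Int)),((2:Int),(1:Int))] from by decide]
    symm
    apply pv_foldl_fix
    intro rv jb hjb
    fin_cases hjb <;> simp only <;> rw [if_neg (by omega)]
  · obtain ⟨h1, h2⟩ := hx
    interval_cases x <;> exact ⟨by decide, by decide⟩

theorem pv_row_4 (x : Int) :
    ((PySem.List.pyRange 0 7 1).flatMap (fun j =>
        if j ≥ x ∧ j < x + (3:Int) then
          (PySem.Int.toStr (PySem.List.pyGetD ([0,0,1] : List Int) (j - x) 0)).toList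
        else ['0'])).length = 7 ∧
    ((PySem.List.pyRange 0 7 1).flatMap (fun j =>
        if j ≥ x ∧ j < x + (3:Int) then
          (PySem.Int.toStr (PySem.List.pyGetD ([0,0,1] : List Int) (j - x) 0)).toList
        else ['0'])).foldl pvStep 0
      = (PySem.List.enumerate ([0,0,1] : List Int)).foldl
          (fun rv jb =>
            let c := x + jb.1
            if 0 ≤ c ∧ c < 7 then rv + jb.2 * 2 ^ (7 - 1 - c).toNat else rv) 0 := by
  rcases (by omega : 7 ≤ x ∨ x + 7 ≤ 0 ∨ (-6 ≤ x ∧ x ≤ 6)) with hx | hx | hx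
  · rw [pv_flatMap_congr (g := fun _ => ['0'])
      (by intro j hj; rw [PySem.List.mem_pyRange_one] at hj; rw [if_neg (by omega)])]
    refine ⟨by decide, ?_⟩
    rw [show PySem.List.enumerate ([0,0,1] : List Int) = [((0:Int),(0:Int)),((1:Int),(0:Int)),((2:Int),(1:Int))] from by decide]
    symm
    apply pv_foldl_fix
    intro rv jb hjb
    fin_cases hjb <;> simp only <;> rw [if_neg (by omega)]
  · rw [pv_flatMap_congr (g := fun _ => ['0'])
      (by intro j hj; rw [PySem.List.mem_pyRange_one] at hj; rw [if_neg (by omega)])]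
    refine ⟨by decide, ?_⟩
    rw [show PySem.List.enumerate ([0,0,1] : List Int) = [((0:Int),(0:Int)),((1:Int),(0:Int)),((2:Int),(1:Int))] from by decide]
    symm
    apply pv_foldl_fix
    intro rv jb hjb
    fin_cases hjb <;> simp only <;> rw [if_neg (by omega)]
  · obtain ⟨h1, h2⟩ := hx
    interval_cases x <;> exact ⟨by decide, by decide⟩

theorem pv_row_5 (x : Int) :
    ((PySem.List.pyRange 0 7 1).flatMap (fun j =>
        if j ≥ x ∧ j < x + (1:Int) then
          (PySem.Int.toStr (PySem.List.pyGetD ([1] : List Int) (j - x) 0)).toList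
        else ['0'])).length = 7 ∧
    ((PySem.List.pyRange 0 7 1).flatMap (fun j =>
        if j ≥ x ∧ j < x + (1:Int) then
          (PySem.Int.toStr (PySem.List.pyGetD ([1] : List Int) (j - x) 0)).toList
        else ['0'])).foldl pvStep 0
      = (PySem.List.enumerate ([1] : List Int)).foldl
          (fun rv jb =>
            let c := x + jb.1
            if 0 ≤ c ∧ c < 7 then rv + jb.2 * 2 ^ (7 - 1 - c).toNat else rv) 0 := by
  rcases (by omega : 7 ≤ x ∨ x + 7 ≤ 0 ∨ (-6 ≤ x ∧ x ≤ 6)) with hx | hx | hx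
  · rw [pv_flatMap_congr (g := fun _ => ['0'])
      (by intro j hj; rw [PySem.List.mem_pyRange_one] at hj; rw [if_neg (by omega)])]
    refine ⟨by decide, ?_⟩
    rw [show PySem.List.enumerate ([1] : List Int) = [((0:Int),(1:Int))] from by decide]
    symm
    apply pv_foldl_fix
    intro rv jb hjb
    fin_cases hjb <;> simp only <;> rw [if_neg (by omega)]
  · rw [pv_flatMap_congr (g := fun _ => ['0'])
      (by intro j hj; rw [PySem.List.mem_pyRange_one] at hj; rw [if_neg (by omega)])]
    refine ⟨by decide, ?_⟩
    rw [show PySem.List.enumerate ([1] : List Int) = [((0:Int),(1:Int))] from by decide]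
    symm
    apply pv_foldl_fix
    intro rv jb hjb
    fin_cases hjb <;> simp only <;> rw [if_neg (by omega)]
  · obtain ⟨h1, h2⟩ := hx
    interval_cases x <;> exact ⟨by decide, by decide⟩

theorem pv_row_6 (x : Int) :
    ((PySem.List.pyRange 0 7 1).flatMap (fun j =>
        if j ≥ x ∧ j < x + (2:Int) then
          (PySem.Int.toStr (PySem.List.pyGetD ([1,1] : List Int) (j - x) 0)).toList
        else ['0'])).length = 7 ∧
    ((PySem.List.pyRange 0 7 1).flatMap (fun j =>
        if j ≥ x ∧ j < x + (2:Int) then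
          (PySem.Int.toStr (PySem.List.pyGetD ([1,1] : List Int) (j - x) 0)).toList
        else ['0'])).foldl pvStep 0
      = (PySem.List.enumerate ([1,1] : List Int)).foldl
          (fun rv jb =>
            let c := x + jb.1
            if 0 ≤ c ∧ c < 7 then rv + jb.2 * 2 ^ (7 - 1 - c).toNat else rv) 0 := by
  rcases (by omega : 7 ≤ x ∨ x + 7 ≤ 0 ∨ (-6 ≤ x ∧ x ≤ 6)) with hx | hx | hx
  · rw [pv_flatMap_congr (g := fun _ => ['0'])
      (by intro j hj; rw [PySem.List.mem_pyRange_one] at hj; rw [if_neg (by omega)])]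
    refine ⟨by decide, ?_⟩
    rw [show PySem.List.enumerate ([1,1] : List Int) = [((0:Int),(1:Int)),((1:Int),(1:Int))] from by decide]
    symm
    apply pv_foldl_fix
    intro rv jb hjb
    fin_cases hjb <;> simp only <;> rw [if_neg (by omega)]
  · rw [pv_flatMap_congr (g := fun _ => ['0'])
      (by intro j hj; rw [PySem.List.mem_pyRange_one] at hj; rw [if_neg (by omega)])]
    refine ⟨by decide, ?_⟩
    rw [show PySem.List.enumerate ([1,1] : List Int) = [((0:Int),(1:Int)),((1:Int),(1:Int))] from by decide]
    symm
    apply pv_foldl_fix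
    intro rv jb hjb
    fin_cases hjb <;> simp only <;> rw [if_neg (by omega)]
  · obtain ⟨h1, h2⟩ := hx
    interval_cases x <;> exact ⟨by decide, by decide⟩

-- one in-range row of A's string (7 characters) parses to B's row value
theorem pv_chunk_spec (x rock d : Int) (hr : -5 ≤ rock) (hr2 : rock < 5)
    (hd : 0 ≤ d) (hd2 : d < PySem.List.pyGetD pvHeight rock 0) :
    ((PySem.List.pyRange 0 7 1).flatMap (fun j =>
        if j ≥ x ∧ j < x + PySem.List.pyGetD pvWidth rock 0 then
          (PySem.Int.toStr (PySem.List.pyGetD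
            (PySem.List.pyGetD (PySem.List.pyGetD pvRocks rock []) d []) (j - x) 0)).toList
        else ['0'])).length = 7 ∧
    ((PySem.List.pyRange 0 7 1).flatMap (fun j =>
        if j ≥ x ∧ j < x + PySem.List.pyGetD pvWidth rock 0 then
          (PySem.Int.toStr (PySem.List.pyGetD
            (PySem.List.pyGetD (PySem.List.pyGetD pvRocks rock []) d []) (j - x) 0)).toList
        else ['0'])).foldl pvStep 0
      = (PySem.List.enumerate (PySem.List.pyGetD (PySem.List.pyGetD pvRocks rock []) d [])).foldl
          (fun rv jb =>
            let c := x + jb.1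
            if 0 ≤ c ∧ c < 7 then rv + jb.2 * 2 ^ (7 - 1 - c).toNat else rv) 0 := by
  rcases (by omega : rock = -5 ∨ rock = -4 ∨ rock = -3 ∨ rock = -2 ∨ rock = -1 ∨ rock = 0 ∨ rock = 1 ∨ rock = 2 ∨ rock = 3 ∨ rock = 4) with rfl|rfl|rfl|rfl|rfl|rfl|rfl|rfl|rfl|rfl
  · rw [show PySem.List.pyGetD pvHeight (-5) 0 = (1:Int) from by decide] at hd2
    rw [show PySem.List.pyGetD pvWidth (-5) 0 = (4:Int) from by decide,
        show PySem.List.pyGetD pvRocks (-5) [] = ([[1,1,1,1]] : List (List Int)) from by decide]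
    rcases (by omega : d = 0) with rfl
    rw [show PySem.List.pyGetD ([[1,1,1,1]] : List (List Int)) (0) [] = ([1,1,1,1] : List Int) from by decide]
    exact pv_row_1 x
  · rw [show PySem.List.pyGetD pvHeight (-4) 0 = (3:Int) from by decide] at hd2
    rw [show PySem.List.pyGetD pvWidth (-4) 0 = (3:Int) from by decide,
        show PySem.List.pyGetD pvRocks (-4) [] = ([[0,1,0],[1,1,1],[0,1,0]] : List (List Int)) from by decide]
    rcases (by omega : d = 0 ∨ d = 1 ∨ d = 2) with rfl|rfl|rfl
    · rw [show PySem.List.pyGetD ([[0,1,0],[1,1,1],[0,1,0]] : List (List Int)) (0) [] = ([0,1,0] : List Int) from by decide]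
      exact pv_row_2 x
    · rw [show PySem.List.pyGetD ([[0,1,0],[1,1,1],[0,1,0]] : List (List Int)) (1) [] = ([1,1,1] : List Int) from by decide]
      exact pv_row_3 x
    · rw [show PySem.List.pyGetD ([[0,1,0],[1,1,1],[0,1,0]] : List (List Int)) (2) [] = ([0,1,0] : List Int) from by decide]
      exact pv_row_2 x
  · rw [show PySem.List.pyGetD pvHeight (-3) 0 = (3:Int) from by decide] at hd2
    rw [show PySem.List.pyGetD pvWidth (-3) 0 = (3:Int) from by decide,
        show PySem.List.pyGetD pvRocks (-3) [] = ([[1,1,1],[0,0,1],[0,0,1]] : List (List Int)) from by decide]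
    rcases (by omega : d = 0 ∨ d = 1 ∨ d = 2) with rfl|rfl|rfl
    · rw [show PySem.List.pyGetD ([[1,1,1],[0,0,1],[0,0,1]] : List (List Int)) (0) [] = ([1,1,1] : List Int) from by decide]
      exact pv_row_3 x
    · rw [show PySem.List.pyGetD ([[1,1,1],[0,0,1],[0,0,1]] : List (List Int)) (1) [] = ([0,0,1] : List Int) from by decide]
      exact pv_row_4 x
    · rw [show PySem.List.pyGetD ([[1,1,1],[0,0,1],[0,0,1]] : List (List Int)) (2) [] = ([0,0,1] : List Int) from by decide]
      exact pv_row_4 x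
  · rw [show PySem.List.pyGetD pvHeight (-2) 0 = (4:Int) from by decide] at hd2
    rw [show PySem.List.pyGetD pvWidth (-2) 0 = (1:Int) from by decide,
        show PySem.List.pyGetD pvRocks (-2) [] = ([[1],[1],[1],[1]] : List (List Int)) from by decide]
    rcases (by omega : d = 0 ∨ d = 1 ∨ d = 2 ∨ d = 3) with rfl|rfl|rfl|rfl
    · rw [show PySem.List.pyGetD ([[1],[1],[1],[1]] : List (List Int)) (0) [] = ([1] : List Int) from by decide]
      exact pv_row_5 x
    · rw [show PySem.List.pyGetD ([[1],[1],[1],[1]] : List (List Int)) (1) [] = ([1] : List Int) from by decide]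
      exact pv_row_5 x
    · rw [show PySem.List.pyGetD ([[1],[1],[1],[1]] : List (List Int)) (2) [] = ([1] : List Int) from by decide]
      exact pv_row_5 x
    · rw [show PySem.List.pyGetD ([[1],[1],[1],[1]] : List (List Int)) (3) [] = ([1] : List Int) from by decide]
      exact pv_row_5 x
  · rw [show PySem.List.pyGetD pvHeight (-1) 0 = (2:Int) from by decide] at hd2
    rw [show PySem.List.pyGetD pvWidth (-1) 0 = (2:Int) from by decide,
        show PySem.List.pyGetD pvRocks (-1) [] = ([[1,1],[1,1]] : List (List Int)) from by decide]
    rcases (by omega : d = 0 ∨ d = 1) with rfl|rfl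
    · rw [show PySem.List.pyGetD ([[1,1],[1,1]] : List (List Int)) (0) [] = ([1,1] : List Int) from by decide]
      exact pv_row_6 x
    · rw [show PySem.List.pyGetD ([[1,1],[1,1]] : List (List Int)) (1) [] = ([1,1] : List Int) from by decide]
      exact pv_row_6 x
  · rw [show PySem.List.pyGetD pvHeight (0) 0 = (1:Int) from by decide] at hd2
    rw [show PySem.List.pyGetD pvWidth (0) 0 = (4:Int) from by decide,
        show PySem.List.pyGetD pvRocks (0) [] = ([[1,1,1,1]] : List (List Int)) from by decide]
    rcases (by omega : d = 0) with rfl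
    rw [show PySem.List.pyGetD ([[1,1,1,1]] : List (List Int)) (0) [] = ([1,1,1,1] : List Int) from by decide]
    exact pv_row_1 x
  · rw [show PySem.List.pyGetD pvHeight (1) 0 = (3:Int) from by decide] at hd2
    rw [show PySem.List.pyGetD pvWidth (1) 0 = (3:Int) from by decide,
        show PySem.List.pyGetD pvRocks (1) [] = ([[0,1,0],[1,1,1],[0,1,0]] : List (List Int)) from by decide]
    rcases (by omega : d = 0 ∨ d = 1 ∨ d = 2) with rfl|rfl|rfl
    · rw [show PySem.List.pyGetD ([[0,1,0],[1,1,1],[0,1,0]] : List (List Int)) (0) [] = ([0,1,0] : List Int) from by decide]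
      exact pv_row_2 x
    · rw [show PySem.List.pyGetD ([[0,1,0],[1,1,1],[0,1,0]] : List (List Int)) (1) [] = ([1,1,1] : List Int) from by decide]
      exact pv_row_3 x
    · rw [show PySem.List.pyGetD ([[0,1,0],[1,1,1],[0,1,0]] : List (List Int)) (2) [] = ([0,1,0] : List Int) from by decide]
      exact pv_row_2 x
  · rw [show PySem.List.pyGetD pvHeight (2) 0 = (3:Int) from by decide] at hd2
    rw [show PySem.List.pyGetD pvWidth (2) 0 = (3:Int) from by decide,
        show PySem.List.pyGetD pvRocks (2) [] = ([[1,1,1],[0,0,1],[0,0,1]] : List (List Int)) from by decide]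
    rcases (by omega : d = 0 ∨ d = 1 ∨ d = 2) with rfl|rfl|rfl
    · rw [show PySem.List.pyGetD ([[1,1,1],[0,0,1],[0,0,1]] : List (List Int)) (0) [] = ([1,1,1] : List Int) from by decide]
      exact pv_row_3 x
    · rw [show PySem.List.pyGetD ([[1,1,1],[0,0,1],[0,0,1]] : List (List Int)) (1) [] = ([0,0,1] : List Int) from by decide]
      exact pv_row_4 x
    · rw [show PySem.List.pyGetD ([[1,1,1],[0,0,1],[0,0,1]] : List (List Int)) (2) [] = ([0,0,1] : List Int) from by decide]
      exact pv_row_4 x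
  · rw [show PySem.List.pyGetD pvHeight (3) 0 = (4:Int) from by decide] at hd2
    rw [show PySem.List.pyGetD pvWidth (3) 0 = (1:Int) from by decide,
        show PySem.List.pyGetD pvRocks (3) [] = ([[1],[1],[1],[1]] : List (List Int)) from by decide]
    rcases (by omega : d = 0 ∨ d = 1 ∨ d = 2 ∨ d = 3) with rfl|rfl|rfl|rfl
    · rw [show PySem.List.pyGetD ([[1],[1],[1],[1]] : List (List Int)) (0) [] = ([1] : List Int) from by decide]
      exact pv_row_5 x
    · rw [show PySem.List.pyGetD ([[1],[1],[1],[1]] : List (List Int)) (1) [] = ([1] : List Int) from by decide]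
      exact pv_row_5 x
    · rw [show PySem.List.pyGetD ([[1],[1],[1],[1]] : List (List Int)) (2) [] = ([1] : List Int) from by decide]
      exact pv_row_5 x
    · rw [show PySem.List.pyGetD ([[1],[1],[1],[1]] : List (List Int)) (3) [] = ([1] : List Int) from by decide]
      exact pv_row_5 x
  · rw [show PySem.List.pyGetD pvHeight (4) 0 = (2:Int) from by decide] at hd2
    rw [show PySem.List.pyGetD pvWidth (4) 0 = (2:Int) from by decide,
        show PySem.List.pyGetD pvRocks (4) [] = ([[1,1],[1,1]] : List (List Int)) from by decide]
    rcases (by omega : d = 0 ∨ d = 1) with rfl|rfl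
    · rw [show PySem.List.pyGetD ([[1,1],[1,1]] : List (List Int)) (0) [] = ([1,1] : List Int) from by decide]
      exact pv_row_6 x
    · rw [show PySem.List.pyGetD ([[1,1],[1,1]] : List (List Int)) (1) [] = ([1,1] : List Int) from by decide]
      exact pv_row_6 x

theorem pv_main (x y rock : Int) (hr : -5 ≤ rock) (hr2 : rock < 5) :
    ∀ (ys : List Int) (out : List Char),
    (ys.foldl (fun out i =>
        if i < y ∨ i ≥ y + PySem.List.pyGetD pvHeight rock 0 then
          out ++ List.replicate 7 '0'
        else
          (PySem.List.pyRange 0 7 1).foldl (fun out j =>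
            if j ≥ x ∧ j < x + PySem.List.pyGetD pvWidth rock 0 then
              out ++ (PySem.Int.toStr (PySem.List.pyGetD
                (PySem.List.pyGetD (PySem.List.pyGetD pvRocks rock []) (i - y) []) (j - x) 0)).toList
            else out ++ ['0']) out) out).foldl pvStep 0
    = ys.foldl (fun result i =>
        let row_val : Int :=
          if y ≤ i ∧ i < y + PySem.List.pyGetD pvHeight rock 0 then
            (PySem.List.enumerate (PySem.List.pyGetD (PySem.List.pyGetD pvRocks rock []) (i - y) [])).foldl
              (fun rv jb =>
                let c := x + jb.1
                if 0 ≤ c ∧ c < 7 then rv + jb.2 * 2 ^ (7 - 1 - c).toNat else rv) 0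
          else 0
        result * 2 ^ 7 + row_val) (out.foldl pvStep 0) := by
  intro ys
  induction ys with
  | nil => intro out; rfl
  | cons i ys ih =>
    intro out
    simp only [List.foldl_cons]
    rw [ih]
    congr 1
    by_cases hc : i < y ∨ i ≥ y + PySem.List.pyGetD pvHeight rock 0
    · rw [if_pos hc, if_neg (by omega)]
      rw [List.foldl_append, pvParse_scale,
        show (List.replicate 7 '0').foldl pvStep 0 = 0 from by decide,
        show (List.replicate 7 '0').length = 7 from by decide]
    · rw [if_neg hc, if_pos (by omega)]
      rw [show (fun (out : List Char) (j : Int) =>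
            if j ≥ x ∧ j < x + PySem.List.pyGetD pvWidth rock 0 then
              out ++ (PySem.Int.toStr (PySem.List.pyGetD
                (PySem.List.pyGetD (PySem.List.pyGetD pvRocks rock []) (i - y) []) (j - x) 0)).toList
            else out ++ ['0'])
          = (fun out j => out ++ (if j ≥ x ∧ j < x + PySem.List.pyGetD pvWidth rock 0 then
              (PySem.Int.toStr (PySem.List.pyGetD
                (PySem.List.pyGetD (PySem.List.pyGetD pvRocks rock []) (i - y) []) (j - x) 0)).toList
            else ['0'])) from by funext o j; split_ifs <;> rfl]
      rw [PySem.List.foldl_append_eq_flatMap, List.foldl_append]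
      obtain ⟨hlen, hval⟩ := pv_chunk_spec x rock (i - y) hr hr2 (by omega) (by omega)
      rw [pvParse_scale, hlen, hval]

-- when every i < y, A's short-circuit never reads HEIGHT[rock]: both sides emit all-zero rows
theorem pv_main_below (x y rock : Int) :
    ∀ (ys : List Int), (∀ i ∈ ys, i < y) → ∀ (out : List Char),
    (ys.foldl (fun out i =>
        if i < y ∨ i ≥ y + PySem.List.pyGetD pvHeight rock 0 then
          out ++ List.replicate 7 '0'
        else
          (PySem.List.pyRange 0 7 1).foldl (fun out j =>
            if j ≥ x ∧ j < x + PySem.List.pyGetD pvWidth rock 0 then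
              out ++ (PySem.Int.toStr (PySem.List.pyGetD
                (PySem.List.pyGetD (PySem.List.pyGetD pvRocks rock []) (i - y) []) (j - x) 0)).toList
            else out ++ ['0']) out) out).foldl pvStep 0
    = ys.foldl (fun result i =>
        let row_val : Int :=
          if y ≤ i ∧ i < y + PySem.List.pyGetD pvHeight rock 0 then
            (PySem.List.enumerate (PySem.List.pyGetD (PySem.List.pyGetD pvRocks rock []) (i - y) [])).foldl
              (fun rv jb =>
                let c := x + jb.1
                if 0 ≤ c ∧ c < 7 then rv + jb.2 * 2 ^ (7 - 1 - c).toNat else rv) 0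
          else 0
        result * 2 ^ 7 + row_val) (out.foldl pvStep 0) := by
  intro ys
  induction ys with
  | nil => intro _ out; rfl
  | cons i ys ih =>
    intro h out
    have hi : i < y := h i List.mem_cons_self
    simp only [List.foldl_cons]
    rw [ih (fun j hj => h j (List.mem_cons_of_mem i hj))]
    congr 1
    rw [if_pos (Or.inl hi), if_neg (by omega)]
    rw [List.foldl_append, pvParse_scale,
      show (List.replicate 7 '0').foldl pvStep 0 = 0 from by decide,
      show (List.replicate 7 '0').length = 7 from by decide]

-- ===== VERDICT (by name: the statement is the Claim_ definition above) =====
theorem bitstring_spec : Claim_equal_bitstring := by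
  intro x y rock y_rng _ hP
  unfold Spec_bitstring bitstring bitstring_alt pvParse
  rcases hP.2 with hrock | hbelow
  · simpa using (pv_main x y rock hrock.1 hrock.2 y_rng [])
  · simpa using (pv_main_below x y rock y_rng hbelow [])

theorem bitstring_raises : Claim_raises_bitstring := by
  unfold Claim_raises_bitstring
  constructor
  · intro x y rock y_rng _ hR hP
    exact hP.1 hR
  · exact ⟨by decide, by decide, by decide⟩

-- self-check: the witness value asserted by Claim_raises_bitstring is B's value on the raising input
theorem pv_raise_value_ok : bitstring_alt 0 0 0 [] = pvRaiseWitnessOut_bitstring := by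
  have h := bitstring_raises
  unfold Claim_raises_bitstring at h
  exact h.2.2.2
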